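-- pv_equiv track=rewrite | github.com/ThabaniM/level-0-coding-challenges | task0-9.py | make_vowel
-- ===== SOURCE A (Python) =====
-- def make_vowel(word):
--     vowel = ''
--     for letter in word:
--         letter = letter.lower()
--         if letter == 'a' or letter == 'o' or letter == 'u' or letter == 'i':
--             if letter not in vowel:
--                 vowel = vowel + letter.lower() + ', '
--
--     return vowel
-- ===== SOURCE B (Python) =====
-- def make_vowel(word):
--     w = word.lower()
--     hits = sorted(((w.find(v), v) for v in 'aoui' if v in w), key=lambda p: p[0])
--     return ''.join(v + ', ' for _, v in hits)
-- ===== Notes on version B (the rewrite author's own statement) =====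
-- stated objective: faster
-- what changed: Replaces A's per-character scan with a dedup accumulator by a query-per-vowel algorithm: compute w.find(v) for each of the four vowels, keep the ones present, sort the (first-index, vowel) pairs, and join — dedup and the character loop disappear entirely.
import Mathlib
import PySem

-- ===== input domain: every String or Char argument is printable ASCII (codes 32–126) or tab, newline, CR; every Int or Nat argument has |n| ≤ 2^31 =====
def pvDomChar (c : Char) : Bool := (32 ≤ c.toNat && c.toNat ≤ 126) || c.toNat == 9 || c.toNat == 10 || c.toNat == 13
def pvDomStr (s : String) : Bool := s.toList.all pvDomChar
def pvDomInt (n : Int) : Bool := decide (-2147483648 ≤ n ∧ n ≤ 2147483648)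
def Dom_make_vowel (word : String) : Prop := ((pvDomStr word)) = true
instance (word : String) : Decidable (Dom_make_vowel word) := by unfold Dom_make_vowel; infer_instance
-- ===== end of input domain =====

-- B replaces A's dedup-accumulator scan by four find queries (one per vowel) sorted by first index; objective: faster (constant factor).

-- ===== PORT A =====
-- A: one loop; lowers each letter, tests it against the four vowels, uses substring
-- membership in the accumulated string as the dedup test, appends letter + ', '.
def make_vowel (word : String) : String :=
  String.mk (word.toList.foldl (fun vowel letter =>
      let l := PySem.Chars.lowerChar letter
      if l = 'a' ∨ l = 'o' ∨ l = 'u' ∨ l = 'i' then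
        if PySem.Chars.isIn [l] vowel then vowel
        else vowel ++ [PySem.Chars.lowerChar l] ++ [',', ' ']
      else vowel) [])

-- ===== PORT B =====
-- B: for each of the four vowels, test membership and compute its first index with
-- find; sort the surviving (index, vowel) pairs by index; join vowel + ', '.
def make_vowel_alt (word : String) : String :=
  let w := PySem.Chars.lower word.toList
  let hits := PySem.List.sorted
      ((['a', 'o', 'u', 'i'].filter (fun v => PySem.Chars.isIn [v] w)).map
        (fun v => (PySem.Chars.find w [v], v)))
      (fun p => p.1)
  String.mk (PySem.Chars.join [] (hits.map (fun p => [p.2, ',', ' '])))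

-- ===== PRECONDITION & SPEC =====
def Spec_make_vowel (word : String) (out : String) : Prop := out = make_vowel_alt word
instance (word : String) (out : String) : Decidable (Spec_make_vowel word out) := by unfold Spec_make_vowel; infer_instance

-- ===== CLAIM =====
def Claim_equal_make_vowel : Prop := ∀ (word : String), Dom_make_vowel word → Spec_make_vowel word (make_vowel word)

-- ===== LEMMAS AND PROOFS =====

-- B's formatting stage, as a flatMap.
def pvFmt (u : List Char) : List Char := u.flatMap (fun v => [v, ',', ' '])

lemma pvJoin_fmt (u : List Char) :
    PySem.Chars.join [] (u.map (fun v => [v, ',', ' '])) = pvFmt u := by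
  simp [PySem.Chars.join, List.intercalate, pvFmt]
  induction u with
  | nil => rfl
  | cons a t ih => cases t <;> simp_all

lemma pvMem_fmt {l : Char} (hl : l ≠ ',' ∧ l ≠ ' ') (u : List Char) :
    l ∈ pvFmt u ↔ l ∈ u := by
  simp [pvFmt, List.mem_flatMap]
  constructor
  · rintro ⟨a, ha, h | h | h⟩ <;> simp_all
  · intro h; exact ⟨l, h, Or.inl rfl⟩

lemma pvIsVowel {l : Char} (h : l = 'a' ∨ l = 'o' ∨ l = 'u' ∨ l = 'i') :
    l ≠ ',' ∧ l ≠ ' ' ∧ PySem.Chars.lowerChar l = l := by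
  rcases h with h | h | h | h <;> subst h <;> exact ⟨by decide, by decide, by decide⟩

-- A's loop invariant (proof-side): running A's loop body over cs starting from the
-- formatted accumulator pvFmt u computes pvFmt of the Set.add fold over the
-- filtered, lowered cs starting from u, provided u holds vowels only.
lemma pvLoop_eq (cs : List Char) : ∀ u : List Char,
    (∀ x ∈ u, x = 'a' ∨ x = 'o' ∨ x = 'u' ∨ x = 'i') →
    cs.foldl (fun vowel letter =>
        let l := PySem.Chars.lowerChar letter
        if l = 'a' ∨ l = 'o' ∨ l = 'u' ∨ l = 'i' then
          if PySem.Chars.isIn [l] vowel then vowel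
          else vowel ++ [PySem.Chars.lowerChar l] ++ [',', ' ']
        else vowel) (pvFmt u)
    = pvFmt (((cs.map PySem.Chars.lowerChar).filter
        (fun c => PySem.Set.contains ['a', 'o', 'u', 'i'] c)).foldl PySem.Set.add u) := by
  induction cs with
  | nil => intro u _; rfl
  | cons c cs ih =>
    intro u hu
    simp only [List.map_cons, List.foldl_cons]
    by_cases hv : PySem.Chars.lowerChar c = 'a' ∨ PySem.Chars.lowerChar c = 'o' ∨
        PySem.Chars.lowerChar c = 'u' ∨ PySem.Chars.lowerChar c = 'i'
    · obtain ⟨hc1, hc2, hlow⟩ := pvIsVowel hv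
      have hmemfmt : PySem.Chars.isIn [PySem.Chars.lowerChar c] (pvFmt u) = true ↔
          PySem.Chars.lowerChar c ∈ u := by
        rw [PySem.Chars.isIn_iff_infix, List.singleton_infix_iff]
        exact pvMem_fmt ⟨hc1, hc2⟩ u
      have hfilter : (fun x => PySem.Set.contains ['a', 'o', 'u', 'i'] x)
          (PySem.Chars.lowerChar c) = true := by
        simp [PySem.Set.contains]
        rcases hv with h | h | h | h <;> simp [h]
      rw [List.filter_cons_of_pos hfilter, List.foldl_cons]
      by_cases hm : PySem.Chars.lowerChar c ∈ u
      · have hadd : PySem.Set.add u (PySem.Chars.lowerChar c) = u := by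
          simp [PySem.Set.add, PySem.Set.contains, hm]
        simp only [if_pos hv, if_pos (hmemfmt.mpr hm), hadd]
        exact ih u hu
      · have hadd : PySem.Set.add u (PySem.Chars.lowerChar c) = u ++ [PySem.Chars.lowerChar c] := by
          simp [PySem.Set.add, PySem.Set.contains, hm]
        have hisin : PySem.Chars.isIn [PySem.Chars.lowerChar c] (pvFmt u) = false := by
          cases h : PySem.Chars.isIn [PySem.Chars.lowerChar c] (pvFmt u)
          · rfl
          · exact absurd (hmemfmt.mp h) hm
        have hext : pvFmt u ++ [PySem.Chars.lowerChar (PySem.Chars.lowerChar c)] ++ [',', ' ']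
            = pvFmt (u ++ [PySem.Chars.lowerChar c]) := by
          simp [pvFmt, hlow]
        simp only [if_pos hv, hisin, Bool.false_eq_true, if_false, hext, hadd]
        exact ih (u ++ [PySem.Chars.lowerChar c]) (by
          intro x hx
          rcases List.mem_append.mp hx with h | h
          · exact hu x h
          · simp at h; subst h; exact hv)
    · rw [List.filter_cons_of_neg (by simp [PySem.Set.contains]; tauto), if_neg hv]
      exact ih u hu

-- Proof-side model of the Set.add fold: ordered dedup with an explicit 'seen' list.
def pvDedup (seen : List Char) : List Char → List Char
  | [] => []
  | x :: xs => if x ∈ seen then pvDedup seen xs else x :: pvDedup (x :: seen) xs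

lemma pvFoldl_add_eq_pvDedup (xs : List Char) : ∀ (s seen : List Char),
    (∀ x, PySem.Set.contains s x = true ↔ x ∈ seen) →
    xs.foldl PySem.Set.add s = s ++ pvDedup seen xs := by
  induction xs with
  | nil => intro s seen _; simp [pvDedup]
  | cons x xs ih =>
    intro s seen h
    have h' : ∀ y : Char, y ∈ s ↔ y ∈ seen := by
      intro y
      have := h y
      simpa [PySem.Set.contains] using this
    by_cases hx : x ∈ seen
    · have hadd : PySem.Set.add s x = s := by
        simp [PySem.Set.add, PySem.Set.contains, (h' x).mpr hx]
      rw [List.foldl_cons, hadd, pvDedup, if_pos hx]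
      exact ih s seen h
    · have hns : x ∉ s := fun hm => hx ((h' x).mp hm)
      have hadd : PySem.Set.add s x = s ++ [x] := by
        simp [PySem.Set.add, PySem.Set.contains, hns]
      rw [List.foldl_cons, hadd, pvDedup, if_neg hx,
        ih (s ++ [x]) (x :: seen) (by
          intro y
          simp only [PySem.Set.contains, List.contains_append, Bool.or_eq_true,
            List.contains_iff_mem, List.mem_cons]
          rw [h' y]
          tauto)]
      simp

lemma pvMem_pvDedup (xs : List Char) : ∀ seen x,
    x ∈ pvDedup seen xs ↔ x ∈ xs ∧ x ∉ seen := by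
  induction xs with
  | nil => simp [pvDedup]
  | cons a t ih =>
    intro seen x
    by_cases h : a ∈ seen
    · simp only [pvDedup, if_pos h, ih, List.mem_cons]
      constructor
      · rintro ⟨hx1, hx2⟩; exact ⟨Or.inr hx1, hx2⟩
      · rintro ⟨hx1 | hx1, hx2⟩
        · exact absurd (hx1 ▸ h) hx2
        · exact ⟨hx1, hx2⟩
    · simp only [pvDedup, if_neg h, List.mem_cons, ih]
      constructor
      · rintro (rfl | ⟨hx1, hx2⟩)
        · exact ⟨Or.inl rfl, h⟩
        · simp only [not_or] at hx2
          exact ⟨Or.inr hx1, hx2.2⟩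
      · rintro ⟨rfl | hx1, hx2⟩
        · exact Or.inl rfl
        · by_cases hxa : x = a
          · exact Or.inl hxa
          · exact Or.inr ⟨hx1, by simp [hxa, hx2]⟩

lemma pvNodup_pvDedup (xs : List Char) : ∀ seen, (pvDedup seen xs).Nodup := by
  induction xs with
  | nil => simp [pvDedup]
  | cons a t ih =>
    intro seen
    by_cases h : a ∈ seen <;> simp [pvDedup, h, ih]
    intro hmem
    exact ((pvMem_pvDedup t (a :: seen) a).mp hmem).2 (List.mem_cons_self)

-- find on a cons cell, for the two shapes the order proof needs.
lemma pvFind_eq (w sub : List Char) (k : Nat) (h1 : sub <+: w.drop k)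
    (h2 : ∀ i < k, ¬ sub <+: w.drop i) : PySem.Chars.find w sub = (k : Int) := by
  have hinf : sub <:+: w := h1.isInfix.trans (List.drop_suffix k w).isInfix
  have hnn : 0 ≤ PySem.Chars.find w sub := (PySem.Chars.find_nonneg_iff w sub).mpr hinf
  obtain ⟨hpre, hmin⟩ := PySem.Chars.find_spec hnn
  rcases lt_trichotomy (PySem.Chars.find w sub).toNat k with hlt | heq | hgt
  · exact absurd hpre (h2 _ hlt)
  · omega
  · exact absurd h1 (hmin k hgt)

lemma pvSingleton_prefix (v c : Char) (t : List Char) : [v] <+: c :: t ↔ v = c := by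
  constructor
  · rintro ⟨r, hr⟩; exact (List.cons.injEq v r c t ▸ hr).1
  · rintro rfl; exact ⟨t, rfl⟩

lemma pvFind_cons_self (c : Char) (t : List Char) :
    PySem.Chars.find (c :: t) [c] = 0 := by
  exact pvFind_eq (c :: t) [c] 0 ⟨t, rfl⟩ (by omega)

lemma pvFind_cons_ne (c v : Char) (t : List Char) (hne : v ≠ c) (hm : v ∈ t) :
    PySem.Chars.find (c :: t) [v] = PySem.Chars.find t [v] + 1 := by
  have hnn : 0 ≤ PySem.Chars.find t [v] :=
    (PySem.Chars.find_nonneg_iff t [v]).mpr ((List.singleton_infix_iff _ _).mpr hm)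
  obtain ⟨hpre, hmin⟩ := PySem.Chars.find_spec hnn
  have := pvFind_eq (c :: t) [v] ((PySem.Chars.find t [v]).toNat + 1)
    (by rw [List.drop_succ_cons]; exact hpre)
    (by
      intro i hi
      match i with
      | 0 => simpa [pvSingleton_prefix] using hne
      | j + 1 =>
        rw [List.drop_succ_cons]
        exact hmin j (by omega))
  omega

-- Lift a find-based strict order on t to c :: t for lists avoiding c.
lemma pvPairwise_lift (c : Char) (t l : List Char)
    (hmem : ∀ y ∈ l, y ∈ t ∧ y ≠ c)
    (hp : l.Pairwise (fun a b => PySem.Chars.find t [a] < PySem.Chars.find t [b])) :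
    l.Pairwise (fun a b => PySem.Chars.find (c :: t) [a] < PySem.Chars.find (c :: t) [b]) := by
  refine hp.imp_of_mem ?_
  intro a b ha hb hab
  rw [pvFind_cons_ne c a t (hmem a ha).2 (hmem a ha).1,
    pvFind_cons_ne c b t (hmem b hb).2 (hmem b hb).1]
  omega

-- The dedup of the filtered word is strictly increasing in first-occurrence index.
lemma pvDedup_filter_pairwise (w : List Char) : ∀ (p : Char → Bool) (seen : List Char),
    (pvDedup seen (w.filter p)).Pairwise
      (fun a b => PySem.Chars.find w [a] < PySem.Chars.find w [b]) := by
  induction w with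
  | nil => intro p seen; simp [pvDedup]
  | cons c t ih =>
    intro p seen
    by_cases hpc : p c
    · rw [List.filter_cons_of_pos hpc]
      by_cases hcs : c ∈ seen
      · rw [pvDedup, if_pos hcs]
        refine pvPairwise_lift c t _ ?_ (ih p seen)
        intro y hy
        obtain ⟨hy1, hy2⟩ := (pvMem_pvDedup _ _ _).mp hy
        exact ⟨(List.mem_filter.mp hy1).1, fun hyc => hy2 (hyc ▸ hcs)⟩
      · rw [pvDedup, if_neg hcs]
        refine List.pairwise_cons.mpr ⟨?_, ?_⟩
        · intro y hy
          obtain ⟨hy1, hy2⟩ := (pvMem_pvDedup _ _ _).mp hy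
          have hyt : y ∈ t := (List.mem_filter.mp hy1).1
          have hyc : y ≠ c := fun h => hy2 (h ▸ List.mem_cons_self)
          rw [pvFind_cons_self, pvFind_cons_ne c y t hyc hyt]
          have : 0 ≤ PySem.Chars.find t [y] :=
            (PySem.Chars.find_nonneg_iff t [y]).mpr ((List.singleton_infix_iff _ _).mpr hyt)
          omega
        · refine pvPairwise_lift c t _ ?_ (ih p (c :: seen))
          intro y hy
          obtain ⟨hy1, hy2⟩ := (pvMem_pvDedup _ _ _).mp hy
          exact ⟨(List.mem_filter.mp hy1).1, fun hyc => hy2 (hyc ▸ List.mem_cons_self)⟩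
    · rw [List.filter_cons_of_neg hpc]
      refine pvPairwise_lift c t _ ?_ (ih p seen)
      intro y hy
      obtain ⟨hy1, hy2⟩ := (pvMem_pvDedup _ _ _).mp hy
      obtain ⟨hyt, hyp⟩ := List.mem_filter.mp hy1
      exact ⟨hyt, fun hyc => hpc (hyc ▸ hyp)⟩

-- ===== VERDICT (by name: the statement is the Claim_ definition above) =====
theorem make_vowel_spec : Claim_equal_make_vowel := by
  intro word _
  unfold Spec_make_vowel make_vowel make_vowel_alt
  have hlower : PySem.Chars.lower word.toList = word.toList.map PySem.Chars.lowerChar := by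
    simp [PySem.Chars.lower]
  rw [hlower]
  dsimp only
  set w' : List Char := word.toList.map PySem.Chars.lowerChar with hw'
  set vlist : List Char := w'.filter (fun c => PySem.Set.contains ['a', 'o', 'u', 'i'] c) with hvlist
  set D : List Char := pvDedup [] vlist with hD
  set pf : Char → Int × Char := fun v => (PySem.Chars.find w' [v], v) with hpf
  have hmemD : ∀ a, a ∈ D ↔ a ∈ (['a', 'o', 'u', 'i'] : List Char) ∧ a ∈ w' := by
    intro a
    rw [hD, pvMem_pvDedup]
    simp [hvlist, PySem.Set.contains, and_comm]
  have hmemfl : ∀ a, a ∈ (['a', 'o', 'u', 'i'] : List Char).filter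
      (fun v => PySem.Chars.isIn [v] w') ↔ a ∈ (['a', 'o', 'u', 'i'] : List Char) ∧ a ∈ w' := by
    intro a
    simp [List.mem_filter, PySem.Chars.isIn_iff_infix, List.singleton_infix_iff]
  have hperm : (D.map pf).Perm
      (((['a', 'o', 'u', 'i'] : List Char).filter (fun v => PySem.Chars.isIn [v] w')).map pf) :=
    ((List.perm_ext_iff_of_nodup (pvNodup_pvDedup vlist [])
      ((show (['a', 'o', 'u', 'i'] : List Char).Nodup by decide).filter _)).mpr
      (fun a => (hmemD a).trans (hmemfl a).symm)).map pf
  have hpw : (D.map pf).Pairwise (fun p q => p.1 < q.1) :=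
    (List.pairwise_map).mpr (pvDedup_filter_pairwise w' _ [])
  have hsorted := PySem.List.sorted_eq_of_perm_of_pairwise_lt
    (((['a', 'o', 'u', 'i'] : List Char).filter (fun v => PySem.Chars.isIn [v] w')).map pf)
    (D.map pf) (fun p => p.1) hperm hpw
  rw [hsorted]
  have hmm : (D.map pf).map (fun p => [p.2, ',', ' ']) = D.map (fun v => [v, ',', ' ']) := by
    simp [List.map_map, Function.comp, hpf]
  rw [hmm, pvJoin_fmt]
  have h0 := pvLoop_eq word.toList [] (by intro x hx; simp at hx)
  have h1 : pvFmt [] = [] := rfl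
  rw [h1] at h0
  rw [h0]
  congr 1
  rw [← hvlist]
  exact congrArg pvFmt (by simpa using pvFoldl_add_eq_pvDedup vlist [] [] (by simp [PySem.Set.contains]))
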